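-- pv_equiv track=rewrite | github.com/koko12131/ipc_tree | ipc_tree.py | tree_list_f
-- ===== SOURCE A (Python) =====
-- def tree_list_f(x_index,datalist):
--     k = x_index
--     t_list = []
--     for y in range(x_index-1,-1,-1):
--         if datalist[y][1] == datalist[k][1]-1:
--             t_list=[datalist[y][0],datalist[k][0]]
--             break
--     return t_list
-- ===== SOURCE B (Python) =====
-- def tree_list_f(x_index, datalist):
--     # Build a level -> id index of the most recent id seen at each level over
--     # the prefix before x_index, then answer with one lookup of the level one
--     # below row x_index's level.
--     if x_index <= 0:
--         return []
--     target = datalist[x_index][1] - 1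
--     last = {}
--     for row in datalist[:x_index]:
--         if len(row) >= 2:
--             last[row[1]] = row[0]
--     if target in last:
--         return [last[target], datalist[x_index][0]]
--     return []
-- ===== Notes on version B (the rewrite author's own statement) =====
-- stated objective: alternative
-- what changed: Replaces the backward scan with early break by one forward pass that builds a level-to-id dict of the most recent id at each level over datalist[:x_index], answering with a single lookup of the target level; rows without a level field (length < 2) are skipped instead of raising.
import Mathlib
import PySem

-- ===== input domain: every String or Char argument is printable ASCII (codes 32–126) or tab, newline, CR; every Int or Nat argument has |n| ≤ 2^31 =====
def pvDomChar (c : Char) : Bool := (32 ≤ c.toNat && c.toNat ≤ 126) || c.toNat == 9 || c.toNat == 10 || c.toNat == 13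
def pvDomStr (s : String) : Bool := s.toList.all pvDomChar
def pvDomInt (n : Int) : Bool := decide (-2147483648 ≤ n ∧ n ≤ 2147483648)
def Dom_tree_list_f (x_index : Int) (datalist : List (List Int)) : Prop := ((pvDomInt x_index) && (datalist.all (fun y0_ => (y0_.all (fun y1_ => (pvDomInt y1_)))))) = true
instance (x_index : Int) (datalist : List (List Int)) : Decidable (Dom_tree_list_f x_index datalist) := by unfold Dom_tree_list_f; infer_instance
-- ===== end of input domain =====

-- B replaces A's backward scan with early break by one forward pass building a
-- level→id dict (most recent id per level) plus a single lookup (objective: alternative).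

-- datalist[i][j]; Pre_ guarantees every indexing actually reached is in range.
def pvCell (datalist : List (List Int)) (i j : Int) : Int :=
  PySem.List.pyGetD (PySem.List.pyGetD datalist i []) j 0

-- ===== PORT A =====
-- 'for y in range(x_index-1,-1,-1): if …: t_list = …; break' as structural recursion
-- over the countdown range, returning at the first match.
def tree_list_f_go (datalist : List (List Int)) (k : Int) : List Int → List Int
  | [] => []
  | y :: ys =>
      if pvCell datalist y 1 = pvCell datalist k 1 - 1 then
        [pvCell datalist y 0, pvCell datalist k 0]
      else tree_list_f_go datalist k ys

def tree_list_f (x_index : Int) (datalist : List (List Int)) : List Int :=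
  tree_list_f_go datalist x_index (PySem.List.pyRange (x_index - 1) (-1) (-1))

-- ===== PORT B =====
-- Source B's forward pass: dict 'last' of the most recent id at each level over
-- datalist[:x_index], then one lookup of target = datalist[x_index][1] - 1.
def tree_list_f_alt (x_index : Int) (datalist : List (List Int)) : List Int :=
  if x_index ≤ 0 then []
  else
    let krow := PySem.List.pyGetD datalist x_index []
    let target := PySem.List.pyGetD krow 1 0 - 1
    let last := (PySem.List.slice datalist none (some x_index)).foldl
      (fun d row =>
        if 2 ≤ row.length then d.insert (PySem.List.pyGetD row 1 0) (PySem.List.pyGetD row 0 0)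
        else d)
      PySem.Dict.empty
    match last.get? target with
    | some v => [v, PySem.List.pyGetD krow 0 0]
    | none => []

-- ===== PRECONDITION & SPEC =====
-- Pre_ is exactly the set of inputs on which Python A returns (no IndexError):
-- x_index ≤ 0, or x_index in range with row x_index of length ≥ 2 and every
-- short row below x_index covered by a matching (level = target) row above it,
-- so that A's backward scan breaks before reaching the short row.
def Pre_tree_list_f (x_index : Int) (datalist : List (List Int)) : Prop :=
  x_index ≤ 0 ∨
    (x_index < (datalist.length : Int) ∧
      2 ≤ (datalist.getD x_index.toNat []).length ∧
      ∀ y < x_index.toNat, (datalist.getD y []).length < 2 →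
        ∃ z < x_index.toNat, y < z ∧ 2 ≤ (datalist.getD z []).length ∧
          (datalist.getD z []).getD 1 0 = (datalist.getD x_index.toNat []).getD 1 0 - 1)
instance (x_index : Int) (datalist : List (List Int)) : Decidable (Pre_tree_list_f x_index datalist) := by unfold Pre_tree_list_f; infer_instance
def pvWitness_tree_list_f : Int × List (List Int) := (1, [[10, 0], [20, 1]])

def Spec_tree_list_f (x_index : Int) (datalist : List (List Int)) (out : List Int) : Prop := out = tree_list_f_alt x_index datalist
instance (x_index : Int) (datalist : List (List Int)) (out : List Int) : Decidable (Spec_tree_list_f x_index datalist out) := by unfold Spec_tree_list_f; infer_instance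

-- ===== CLAIM (what is proved, stated in full; the proofs are below) =====
def Claim_equal_tree_list_f : Prop := ∀ (x_index : Int) (datalist : List (List Int)), Dom_tree_list_f x_index datalist → Pre_tree_list_f x_index datalist → Spec_tree_list_f x_index datalist (tree_list_f x_index datalist)

-- ===== LEMMAS AND PROOFS =====

-- A's break-at-first-match loop is find? over the scanned index list.
theorem tree_list_f_go_eq_find (d : List (List Int)) (k : Int) (l : List Int) :
    tree_list_f_go d k l =
      match l.find? (fun y => pvCell d y 1 == pvCell d k 1 - 1) with
      | some y => [pvCell d y 0, pvCell d k 0]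
      | none => [] := by
  induction l with
  | nil => rfl
  | cons y ys ih =>
      by_cases h : pvCell d y 1 = pvCell d k 1 - 1
      · simp [tree_list_f_go, h]
      · simp [tree_list_f_go, h, ih]

-- B's dict fold looked up at t is the last qualifying row, i.e. the first in reverse.
theorem get?_levelfold (rows : List (List Int)) (d : PySem.Dict Int Int) (t : Int) :
    (rows.foldl
      (fun d row =>
        if 2 ≤ row.length then d.insert (PySem.List.pyGetD row 1 0) (PySem.List.pyGetD row 0 0)
        else d) d).get? t =
      match rows.reverse.find?
          (fun row => decide (2 ≤ row.length) && (PySem.List.pyGetD row 1 0 == t)) with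
      | some r => some (PySem.List.pyGetD r 0 0)
      | none => d.get? t := by
  induction rows using List.reverseRecOn generalizing d with
  | nil => rfl
  | append_singleton rows r ih =>
      rw [List.foldl_append, List.reverse_append]
      simp only [List.foldl_cons, List.foldl_nil, List.reverse_singleton,
        List.singleton_append, List.find?_cons]
      by_cases hl : 2 ≤ r.length
      · by_cases hk : PySem.List.pyGetD r 1 0 = t
        · simp [hl, hk, PySem.Dict.get?_insert_self]
        · have hk' : (PySem.List.pyGetD r 1 0 == t) = false := by simpa using hk
          simp only [hl, if_true, decide_true, Bool.true_and, hk']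
          rw [PySem.Dict.get?_insert_of_ne _ _ (Ne.symm hk)]
          exact ih d
      · simp only [hl, if_false, decide_false, Bool.false_and]
        exact ih d

-- find? is unchanged when every p-hit that is not a q-hit has a q-hit strictly earlier.
theorem find?_congr_of_earlier {α : Type} (l : List α) (p q : α → Bool)
    (hqp : ∀ a ∈ l, q a = true → p a = true)
    (h : ∀ l1 a l2, l = l1 ++ a :: l2 → p a = true → q a = false → ∃ b ∈ l1, q b = true) :
    l.find? p = l.find? q := by
  induction l with
  | nil => rfl
  | cons a l ih =>
      by_cases hq : q a = true
      · have hp := hqp a (List.mem_cons_self) hq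
        simp [hp, hq]
      · have hp : p a = false := by
          by_contra hpa
          rcases h [] a l rfl (by simpa using hpa) (by simpa using hq) with ⟨b, hb, _⟩
          simp at hb
        rw [List.find?_cons_of_neg (by simp [hp]), List.find?_cons_of_neg (by simp [hq])]
        apply ih
        · exact fun b hb => hqp b (List.mem_cons_of_mem a hb)
        · intro l1 b l2 hsplit hpb hqb
          rcases h (a :: l1) b l2 (by simp [hsplit]) hpb hqb with ⟨c, hc, hqc⟩
          rcases List.mem_cons.mp hc with rfl | hc'
          · simp [hq] at hqc
          · exact ⟨c, hc', hqc⟩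

-- the prefix datalist[:x] as indexed reads over range(x)
theorem take_eq_map_pyRange (dl : List (List Int)) (x : Int) (hxl : x ≤ (dl.length : Int)) :
    dl.take x.toNat = (PySem.List.pyRange 0 x 1).map (fun j => PySem.List.pyGetD dl j []) := by
  rw [PySem.List.pyRange_one]
  simp only [zero_add, Int.sub_zero]
  apply List.ext_getElem
  · simp [List.length_map, List.length_range]
    omega
  · intro i h1 h2
    simp only [List.getElem_take, List.getElem_map, List.getElem_range]
    rw [PySem.List.pyGetD_natCast]
    have hi : i < dl.length := by
      simp [List.length_map, List.length_range] at h2; omega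
    simp [List.getD_eq_getElem?_getD, List.getElem?_eq_getElem hi]

theorem tree_list_f_spec : Claim_equal_tree_list_f := by
  intro x dl _ hpre
  unfold Spec_tree_list_f tree_list_f tree_list_f_alt
  by_cases hx : x ≤ 0
  · rw [PySem.List.pyRange_neg_one_eq_nil (by omega), if_pos hx]
    rfl
  · rcases hpre with h0 | ⟨hlen, hk, hcov⟩
    · omega
    rw [if_neg hx]
    have hx0 : (0:Int) ≤ x := by omega
    -- normalize A's range to the reverse of the forward range
    have hr : PySem.List.pyRange (x - 1) (-1) (-1)
        = (PySem.List.pyRange 0 x 1).reverse := by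
      rw [PySem.List.pyRange_neg_one_eq_reverse]; norm_num
    rw [hr, tree_list_f_go_eq_find]
    -- normalize B's slice to indexed reads
    simp only [PySem.List.slice_to dl hx0, take_eq_map_pyRange dl x (by omega),
      get?_levelfold, ← List.map_reverse, List.find?_map]
    -- the two find?s coincide
    have hfind :
        (PySem.List.pyRange 0 x 1).reverse.find?
            (fun y => pvCell dl y 1 == pvCell dl x 1 - 1)
          = (PySem.List.pyRange 0 x 1).reverse.find?
            ((fun row => decide (2 ≤ row.length)
                && (PySem.List.pyGetD row 1 0 == PySem.List.pyGetD (PySem.List.pyGetD dl x []) 1 0 - 1))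
              ∘ fun j => PySem.List.pyGetD dl j []) := by
      apply find?_congr_of_earlier
      · intro a _ hqa
        simp only [Function.comp, Bool.and_eq_true, decide_eq_true_eq, beq_iff_eq] at hqa ⊢
        exact hqa.2
      · intro l1 a l2 hsplit hpa hqa
        have ha : a ∈ (PySem.List.pyRange 0 x 1).reverse := by
          rw [hsplit]; exact List.mem_append_right _ (List.mem_cons_self)
        have ha' : 0 ≤ a ∧ a < x := by
          rw [List.mem_reverse, PySem.List.mem_pyRange_one] at ha; exact ha
        simp only [beq_iff_eq] at hpa
        simp only [Function.comp] at hqa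
        rw [Bool.and_eq_false_iff, decide_eq_false_iff_not, beq_eq_false_iff_ne] at hqa
        -- a's row must be short: otherwise q would hold
        have hshort : (PySem.List.pyGetD dl a []).length < 2 := by
          rcases hqa with h | h
          · omega
          · exact absurd hpa h
        -- Pre_ supplies a qualifying row z strictly above a
        have hgetD : PySem.List.pyGetD dl a [] = dl.getD a.toNat [] := by
          rw [PySem.List.pyGetD_of_nonneg dl [] ha'.1]
        rcases hcov a.toNat (by omega) (by rw [← hgetD]; exact hshort) with
          ⟨z, hzx, hyz, hzlen, hzlevel⟩
        refine ⟨(z : Int), ?_, ?_⟩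
        · -- (z:Int) lies in l1: it is in the list, and l2 ∪ {a} only holds values ≤ a
          have hzmem : (z : Int) ∈ (PySem.List.pyRange 0 x 1).reverse := by
            rw [List.mem_reverse, PySem.List.mem_pyRange_one]
            constructor <;> omega
          have hza : a < (z : Int) := by omega
          rw [hsplit] at hzmem
          rcases List.mem_append.mp hzmem with h1 | h2
          · exact h1
          · exfalso
            have hpw : ((PySem.List.pyRange 0 x 1).reverse).Pairwise (· > ·) := by
              rw [List.pairwise_reverse]
              exact PySem.List.pairwise_lt_pyRange_one 0 x
            rw [hsplit, List.pairwise_append] at hpw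
            rcases List.mem_cons.mp h2 with rfl | h3
            · omega
            · have := List.rel_of_pairwise_cons hpw.2.1 h3
              omega
        · simp only [Function.comp, Bool.and_eq_true, decide_eq_true_eq, beq_iff_eq]
          rw [PySem.List.pyGetD_of_nonneg dl [] (by positivity),
            show ((z:Int).toNat) = z by omega]
          refine ⟨by simpa using hzlen, ?_⟩
          rw [PySem.List.pyGetD_ofNat', hzlevel,
            PySem.List.pyGetD_of_nonneg dl [] hx0, PySem.List.pyGetD_ofNat']
    rw [hfind]
    -- now both sides case on the same find?
    cases hfound : (PySem.List.pyRange 0 x 1).reverse.find?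
        ((fun row => decide (2 ≤ row.length)
            && (PySem.List.pyGetD row 1 0 == PySem.List.pyGetD (PySem.List.pyGetD dl x []) 1 0 - 1))
          ∘ fun j => PySem.List.pyGetD dl j []) with
    | none => rfl
    | some y =>
        simp only [Option.map_some]
        unfold pvCell
        rfl
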